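-- pv_equiv track=rewrite | github.com/hanameee/Algorithm | Codility/Lesson/16.GreedyAlgorithms/TieRopes.py | solution
-- ===== SOURCE A (Python) =====
-- from collections import deque
--
-- def solution(K, A):
--     answer = 0
--     A = deque(A)
--     while A:
--         cur = A.popleft()
--         if cur >= K:
--             answer += 1
--             continue
--         else:
--             while A:
--                 cur2 = A.popleft()
--                 cur += cur2
--                 if cur >= K:
--                     answer += 1
--                     break
--     return answer
-- ===== SOURCE B (Python) =====
-- def solution(K, A):
--     answer = 0
--     s = 0
--     for x in A:
--         s += x
--         if s >= K:
--             answer += 1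
--             s = 0
--     return answer
-- ===== Notes on version B (the rewrite author's own statement) =====
-- stated objective: simpler
-- what changed: Replaces the deque with nested while-loops by one flat pass over the list with a running-sum accumulator that resets after each counted group.
import Mathlib
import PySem

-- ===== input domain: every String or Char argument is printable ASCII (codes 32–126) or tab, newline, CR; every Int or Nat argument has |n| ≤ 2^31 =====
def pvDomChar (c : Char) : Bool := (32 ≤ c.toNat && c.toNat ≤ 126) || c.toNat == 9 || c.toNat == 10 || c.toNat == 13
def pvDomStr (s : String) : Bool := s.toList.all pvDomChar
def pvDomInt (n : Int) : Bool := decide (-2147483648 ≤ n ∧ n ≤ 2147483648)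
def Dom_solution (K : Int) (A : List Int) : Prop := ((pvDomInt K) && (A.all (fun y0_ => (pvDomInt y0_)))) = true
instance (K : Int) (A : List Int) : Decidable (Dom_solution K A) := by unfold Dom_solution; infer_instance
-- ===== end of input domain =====

-- B replaces A's deque and nested while-loops by one flat accumulator pass; objective: simpler.

-- ===== PORT A =====
-- outer/inner mirror A's outer 'while A' loop and the nested 'while A' loop (cur carries the partial sum)
mutual
def solutionOuter (K : Int) : List Int → Int
  | [] => 0
  | cur :: rest => if cur ≥ K then 1 + solutionOuter K rest else solutionInner K cur rest
def solutionInner (K : Int) (cur : Int) : List Int → Int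
  | [] => 0
  | cur2 :: rest =>
      let cur' := cur + cur2
      if cur' ≥ K then 1 + solutionOuter K rest else solutionInner K cur' rest
end

def solution (K : Int) (A : List Int) : Int := solutionOuter K A

-- ===== PORT B =====
def solution_alt (K : Int) (A : List Int) : Int :=
  (A.foldl (fun st x =>
    let s := st.1 + x
    if s ≥ K then (0, st.2 + 1) else (s, st.2)) ((0 : Int), (0 : Int))).2

-- ===== PRECONDITION & SPEC =====
def Spec_solution (K : Int) (A : List Int) (out : Int) : Prop := out = solution_alt K A
instance (K : Int) (A : List Int) (out : Int) : Decidable (Spec_solution K A out) := by unfold Spec_solution; infer_instance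

-- ===== CLAIM (what is proved, stated in full; the proofs are below) =====
def Claim_equal_solution : Prop := ∀ (K : Int) (A : List Int), Dom_solution K A → Spec_solution K A (solution K A)

-- ===== LEMMAS AND PROOFS =====
theorem solutionOuter_eq_inner_zero (K : Int) (A : List Int) :
    solutionOuter K A = solutionInner K 0 A := by
  cases A with
  | nil => simp [solutionOuter, solutionInner]
  | cons x r => simp [solutionOuter, solutionInner]

theorem foldl_eq_inner (K : Int) (A : List Int) :
    ∀ (s ans : Int),
      (A.foldl (fun st x =>
        let s := st.1 + x
        if s ≥ K then ((0 : Int), st.2 + 1) else (s, st.2)) (s, ans)).2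
      = ans + solutionInner K s A := by
  induction A with
  | nil => intro s ans; simp [solutionInner]
  | cons x r ih =>
      intro s ans
      simp only [List.foldl_cons, solutionInner]
      by_cases h : s + x ≥ K
      · simp only [h, ite_true, ih, solutionOuter_eq_inner_zero]
        ring
      · simp only [h, ite_false, ih]

-- ===== VERDICT (by name: the statement is the Claim_ definition above) =====
theorem solution_spec : Claim_equal_solution := by
  intro K A _
  unfold Spec_solution solution solution_alt
  rw [solutionOuter_eq_inner_zero, foldl_eq_inner]
  ring
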